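-- pv_equiv track=rewrite | github.com/Spar7k/LinguaSub-demo | backend/app/word_export_service.py | _iter_markdownish_content_blocks
-- ===== SOURCE A (Python) =====
-- def _iter_markdownish_content_blocks(content: str) -> list[tuple[str, str]]:
--     blocks: list[tuple[str, str]] = []
--     paragraph_lines: list[str] = []
--
--     def flush_paragraph() -> None:
--         if paragraph_lines:
--             blocks.append(("paragraph", "\n".join(paragraph_lines)))
--             paragraph_lines.clear()
--
--     for raw_line in content.replace("\r\n", "\n").split("\n"):
--         line = raw_line.strip()
--         if not line:
--             flush_paragraph()
--             continue
--
--         if line.startswith("##"):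
--             flush_paragraph()
--             heading = line.lstrip("#").strip()
--             if heading:
--                 blocks.append(("heading", heading))
--             continue
--
--         paragraph_lines.append(line)
--
--     flush_paragraph()
--     return blocks
-- ===== SOURCE B (Python) =====
-- def _classify(raw_line):
--     line = raw_line.strip()
--     if not line:
--         return ("blank", "")
--     if line.startswith("##"):
--         return ("heading", line.lstrip("#").strip())
--     return ("text", line)
--
--
-- def _iter_markdownish_content_blocks(content: str) -> list[tuple[str, str]]:
--     tagged = [_classify(raw) for raw in content.replace("\r\n", "\n").split("\n")]
--     blocks: list[tuple[str, str]] = []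
--     i, n = 0, len(tagged)
--     while i < n:
--         tag, val = tagged[i]
--         if tag == "text":
--             j = i
--             while j < n and tagged[j][0] == "text":
--                 j += 1
--             blocks.append(("paragraph", "\n".join(v for _, v in tagged[i:j])))
--             i = j
--         else:
--             if tag == "heading" and val:
--                 blocks.append(("heading", val))
--             i += 1
--     return blocks
-- ===== Notes on version B (the rewrite author's own statement) =====
-- stated objective: alternative
-- what changed: Replaces A's single stateful loop with mutable paragraph accumulator and flush closure by a two-phase pipeline: classify every line into a tag/value pair, then coalesce consecutive text-tagged runs into paragraph blocks with a run-scanning pass.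
import Mathlib
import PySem

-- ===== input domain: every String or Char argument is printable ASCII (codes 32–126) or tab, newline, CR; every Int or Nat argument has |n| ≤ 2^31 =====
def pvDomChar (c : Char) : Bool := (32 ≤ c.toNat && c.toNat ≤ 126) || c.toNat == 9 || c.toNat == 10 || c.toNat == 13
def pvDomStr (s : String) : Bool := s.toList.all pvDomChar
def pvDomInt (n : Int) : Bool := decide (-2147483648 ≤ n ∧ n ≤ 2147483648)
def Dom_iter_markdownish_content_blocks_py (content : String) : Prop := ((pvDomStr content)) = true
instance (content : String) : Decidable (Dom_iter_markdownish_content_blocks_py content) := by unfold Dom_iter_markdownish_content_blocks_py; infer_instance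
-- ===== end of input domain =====

-- B replaces A's stateful flush-accumulator loop by a classify-then-coalesce pipeline (alternative decomposition, same cost).

-- ===== PORT A =====
-- line.lstrip("#"): drop leading '#' characters — exact hand port of str.lstrip with a one-char argument
def pvLstripHash (s : String) : String := String.ofList (s.toList.dropWhile (fun c => c == '#'))

-- flush_paragraph: emits the pending paragraph block (if any); 'clear' is the [] passed back by the caller
def pvFlush (para : List String) : List (String × String) :=
  if para ≠ [] then [("paragraph", PySem.Str.join "\n" para)] else []

-- the for-loop over lines, state = (blocks, paragraph_lines)
def pvLoopA : List String → List (String × String) → List String → List (String × String)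
  | [], blocks, para => blocks ++ pvFlush para
  | raw :: rest, blocks, para =>
    let line := PySem.Str.strip raw
    if line = "" then pvLoopA rest (blocks ++ pvFlush para) []
    else if PySem.Str.startswith line "##" then
      let heading := PySem.Str.strip (pvLstripHash line)
      pvLoopA rest ((blocks ++ pvFlush para) ++ (if heading ≠ "" then [("heading", heading)] else [])) []
    else pvLoopA rest blocks (para ++ [line])

def iter_markdownish_content_blocks_py (content : String) : List (String × String) :=
  pvLoopA ((PySem.Str.split? (PySem.Str.replace content "\r\n" "\n") "\n").getD []) [] []

-- ===== PORT B =====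
def pvClassify (raw : String) : String × String :=
  let line := PySem.Str.strip raw
  if line = "" then ("blank", "")
  else if PySem.Str.startswith line "##" then ("heading", PySem.Str.strip (pvLstripHash line))
  else ("text", line)

def pvIsText (p : String × String) : Bool := p.1 == "text"

-- the while loop: scan the next run of 'text' lines into one paragraph, else handle one tag
def pvCoalesce : List (String × String) → List (String × String)
  | [] => []
  | (tag, val) :: rest =>
    if tag = "text" then
      ("paragraph", PySem.Str.join "\n" (val :: (rest.takeWhile pvIsText).map Prod.snd))
        :: pvCoalesce (rest.dropWhile pvIsText)
    else if tag = "heading" ∧ val ≠ "" then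
      ("heading", val) :: pvCoalesce rest
    else pvCoalesce rest
termination_by l => l.length
decreasing_by
  · exact Nat.lt_succ_of_le (List.length_dropWhile_le _ _)
  · simp
  · simp

def iter_markdownish_content_blocks_py_alt (content : String) : List (String × String) :=
  pvCoalesce (((PySem.Str.split? (PySem.Str.replace content "\r\n" "\n") "\n").getD []).map pvClassify)

-- ===== PRECONDITION & SPEC =====
def Spec_iter_markdownish_content_blocks_py (content : String) (out : List (String × String)) : Prop := out = iter_markdownish_content_blocks_py_alt content
instance (content : String) (out : List (String × String)) : Decidable (Spec_iter_markdownish_content_blocks_py content out) := by unfold Spec_iter_markdownish_content_blocks_py; infer_instance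

-- ===== CLAIM (what is proved, stated in full; the proofs are below) =====
def Claim_equal_iter_markdownish_content_blocks_py : Prop := ∀ (content : String), Dom_iter_markdownish_content_blocks_py content → Spec_iter_markdownish_content_blocks_py content (iter_markdownish_content_blocks_py content)

-- ===== LEMMAS AND PROOFS =====

-- blocks is a pure prefix of A's loop result
theorem pvLoopA_blocks (ls : List String) (blocks : List (String × String)) (para : List String) :
    pvLoopA ls blocks para = blocks ++ pvLoopA ls [] para := by
  induction ls generalizing blocks para with
  | nil => simp [pvLoopA]
  | cons raw rest ih =>
    simp only [pvLoopA]
    split_ifs with h1 h2 h3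
    · rw [ih (blocks ++ pvFlush para), ih ([] ++ pvFlush para)]; simp
    · rw [ih (blocks ++ pvFlush para ++ [("heading", PySem.Str.strip (pvLstripHash (PySem.Str.strip raw)))]),
          ih ([] ++ pvFlush para ++ [("heading", PySem.Str.strip (pvLstripHash (PySem.Str.strip raw)))])]
      simp
    · rw [ih (blocks ++ pvFlush para ++ []), ih ([] ++ pvFlush para ++ [])]; simp
    · exact ih blocks (para ++ [PySem.Str.strip raw])

-- B's coalesce with a pending (already-stripped) paragraph prefix
def pvG (para : List String) (tagged : List (String × String)) : List (String × String) :=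
  if para = [] then pvCoalesce tagged
  else ("paragraph", PySem.Str.join "\n" (para ++ (tagged.takeWhile pvIsText).map Prod.snd))
        :: pvCoalesce (tagged.dropWhile pvIsText)

theorem pvLoopA_eq_pvG (ls : List String) (para : List String) :
    pvLoopA ls [] para = pvG para (ls.map pvClassify) := by
  induction ls generalizing para with
  | nil =>
    by_cases h : para = [] <;> simp [pvLoopA, pvFlush, pvG, pvCoalesce, h]
  | cons raw rest ih =>
    simp only [pvLoopA, List.map_cons, pvClassify]
    split_ifs with h1 h2 h3
    · -- blank line
      rw [pvLoopA_blocks, ih []]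
      by_cases h : para = [] <;>
        simp [pvG, pvFlush, h, pvCoalesce, pvIsText, List.takeWhile, List.dropWhile]
    · -- heading line, nonempty heading
      rw [pvLoopA_blocks, ih []]
      by_cases h : para = [] <;>
        simp [pvG, pvFlush, h, h3, pvCoalesce, pvIsText, List.takeWhile, List.dropWhile]
    · -- heading line, empty heading
      rw [pvLoopA_blocks, ih []]
      by_cases h : para = [] <;>
        simp [pvG, pvFlush, h, h3, pvCoalesce, pvIsText, List.takeWhile, List.dropWhile]
    · -- text line
      rw [ih (para ++ [PySem.Str.strip raw])]
      by_cases h : para = [] <;>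
        simp [pvG, h, pvCoalesce, pvIsText, List.takeWhile, List.dropWhile]

-- ===== VERDICT (by name: the statement is the Claim_ definition above) =====
theorem iter_markdownish_content_blocks_py_spec : Claim_equal_iter_markdownish_content_blocks_py := by
  intro content _
  unfold Spec_iter_markdownish_content_blocks_py
  unfold iter_markdownish_content_blocks_py iter_markdownish_content_blocks_py_alt
  rw [pvLoopA_eq_pvG]
  simp [pvG]
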